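-- pv_equiv track=rewrite | github.com/muszkin/advent-of-code-2020 | day11.py | check_tl
-- ===== SOURCE A (Python) =====
-- def check_tl(l, i, j, start=False):
--     if l[i][j] == 'X' and not start:
--         return 0
--     if l[i][j] == '#' and not start:
--         return 1
--     if l[i][j] == 'L' and not start:
--         return 0
--     return check_tl(l, i - 1, j - 1)
-- ===== SOURCE B (Python) =====
-- def check_tl(l, i, j, start=False):
--     if start:
--         i -= 1
--         j -= 1
--     # phase 1: locate the first terminator cell on the up-left diagonal
--     while l[i][j] not in ('X', 'L', '#'):
--         i -= 1
--         j -= 1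
--     # phase 2: classify that cell
--     return 1 if l[i][j] == '#' else 0
-- ===== Notes on version B (the rewrite author's own statement) =====
-- stated objective: simpler
-- what changed: A's tail recursion with three per-kind returns and a start flag threaded through every call is replaced by a find-then-classify decomposition: one membership-test loop locates the first terminator cell on the diagonal, then a separate read classifies it as 1 ('#') or 0.
import Mathlib
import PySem

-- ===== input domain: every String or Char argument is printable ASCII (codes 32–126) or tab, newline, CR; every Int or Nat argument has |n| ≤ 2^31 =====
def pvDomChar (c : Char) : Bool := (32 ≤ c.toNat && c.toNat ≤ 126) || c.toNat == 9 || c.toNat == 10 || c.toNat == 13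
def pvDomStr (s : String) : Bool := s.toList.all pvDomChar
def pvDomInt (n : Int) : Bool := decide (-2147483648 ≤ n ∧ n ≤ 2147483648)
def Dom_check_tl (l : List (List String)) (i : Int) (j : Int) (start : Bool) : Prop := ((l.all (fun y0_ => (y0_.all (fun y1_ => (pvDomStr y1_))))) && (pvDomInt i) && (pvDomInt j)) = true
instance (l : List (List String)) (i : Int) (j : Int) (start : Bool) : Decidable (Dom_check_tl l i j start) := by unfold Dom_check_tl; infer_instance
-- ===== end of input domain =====

-- B replaces A's three-branch tail recursion by a find-then-classify decomposition (locate the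
-- first terminator cell, then classify it); equivalence of the RETURN value is proved on Pre_
-- (the inputs where Python A returns instead of raising IndexError).

-- ===== PORT A =====
-- l[i][j] with Python's negative-index wraparound; 'none' = IndexError (excluded by Pre_, port returns 0 there)
def check_tl (l : List (List String)) (i : Int) (j : Int) (start : Bool) : Int :=
  match h : (PySem.List.pyGet? l i).bind (fun r => PySem.List.pyGet? r j) with
  | none => 0
  | some c =>
    if c = "X" ∧ start = false then 0
    else if c = "#" ∧ start = false then 1
    else if c = "L" ∧ start = false then 0
    else check_tl l (i - 1) (j - 1) false
termination_by (i + l.length + 1).toNat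
decreasing_by
  have hi : PySem.Raise.InRange l.length i := by
    by_contra hc
    rw [(PySem.List.pyGet?_eq_none_iff _ _).mpr hc] at h
    simp at h
  have := hi.1
  omega

-- ===== PORT B =====
-- phase 1 of Source B: walk up-left while the cell is not a terminator, return its position
def pvFind (l : List (List String)) (i : Int) (j : Int) : Option (Int × Int) :=
  match h : (PySem.List.pyGet? l i).bind (fun r => PySem.List.pyGet? r j) with
  | none => none
  | some c =>
    if c = "X" || c = "L" || c = "#" then some (i, j)
    else pvFind l (i - 1) (j - 1)
termination_by (i + l.length + 1).toNat
decreasing_by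
  have hi : PySem.Raise.InRange l.length i := by
    by_contra hc
    rw [(PySem.List.pyGet?_eq_none_iff _ _).mpr hc] at h
    simp at h
  have := hi.1
  omega

-- Source B: initial skip, locate the terminator, then classify the located cell
def check_tl_alt (l : List (List String)) (i : Int) (j : Int) (start : Bool) : Int :=
  let p := if start then (i - 1, j - 1) else (i, j)
  match pvFind l p.1 p.2 with
  | none => 0
  | some (a, b) =>
    if (PySem.List.pyGet? l a).bind (fun r => PySem.List.pyGet? r b) = some "#" then 1 else 0

-- ===== PRECONDITION & SPEC =====
-- the cell k steps up-left from (i, j), Python indexing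
def pvDiag (l : List (List String)) (i : Int) (j : Int) (k : Nat) : Option String :=
  (PySem.List.pyGet? l (i - k)).bind (fun r => PySem.List.pyGet? r (j - k))

def pvTerm (c : String) : Bool := c = "X" || c = "#" || c = "L"

-- exactly the inputs on which Python A returns: walking up-left from (i, j) (skipping the test at
-- step 0 when start=True), every cell up to the first terminator 'X'/'#'/'L' exists; elsewhere A
-- raises IndexError (or, on huge inputs, RecursionError, which valid indices rule out here).
def Pre_check_tl (l : List (List String)) (i : Int) (j : Int) (start : Bool) : Prop :=
  ∃ k < 2 * l.length + 1,
    (if start then 1 else 0) ≤ k ∧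
    (∀ m ≤ k, (pvDiag l i j m).isSome) ∧
    (∀ m < k, (if start then 1 else 0) ≤ m → (pvDiag l i j m).any pvTerm = false) ∧
    (pvDiag l i j k).any pvTerm = true
instance (l : List (List String)) (i : Int) (j : Int) (start : Bool) : Decidable (Pre_check_tl l i j start) := by unfold Pre_check_tl; infer_instance

def pvWitness_check_tl : List (List String) × Int × Int × Bool := ([["#"]], 0, 0, false)

def Spec_check_tl (l : List (List String)) (i : Int) (j : Int) (start : Bool) (out : Int) : Prop := out = check_tl_alt l i j start
instance (l : List (List String)) (i : Int) (j : Int) (start : Bool) (out : Int) : Decidable (Spec_check_tl l i j start out) := by unfold Spec_check_tl; infer_instance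

-- ===== CLAIM (what is proved, stated in full; the proofs are below) =====
def Claim_equal_check_tl : Prop := ∀ (l : List (List String)) (i : Int) (j : Int) (start : Bool), Dom_check_tl l i j start → Pre_check_tl l i j start → Spec_check_tl l i j start (check_tl l i j start)

-- ===== LEMMAS AND PROOFS =====

-- with start=False, A's recursion computes exactly B's find-then-classify value (even where both hit 'none')
lemma check_tl_false_eq (l : List (List String)) :
    ∀ (i j : Int), check_tl l i j false =
      (match pvFind l i j with
       | none => 0
       | some (a, b) =>
         if (PySem.List.pyGet? l a).bind (fun r => PySem.List.pyGet? r b) = some "#" then 1 else 0) := by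
  suffices h : ∀ (n : Nat) (i j : Int), (i + l.length + 1).toNat ≤ n →
      check_tl l i j false =
      (match pvFind l i j with
       | none => 0
       | some (a, b) =>
         if (PySem.List.pyGet? l a).bind (fun r => PySem.List.pyGet? r b) = some "#" then 1 else 0) by
    intro i j
    exact h (i + l.length + 1).toNat i j le_rfl
  intro n
  induction n with
  | zero =>
    intro i j hle
    have hnone : PySem.List.pyGet? l i = none := by
      apply (PySem.List.pyGet?_eq_none_iff _ _).mpr
      intro hr
      have := hr.1
      omega
    rw [check_tl.eq_def, pvFind.eq_def]
    cases hm : (PySem.List.pyGet? l i).bind (fun r => PySem.List.pyGet? r j) with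
    | none => rfl
    | some c => rw [hnone] at hm; simp at hm
  | succ n ih =>
    intro i j hle
    rw [check_tl.eq_def, pvFind.eq_def]
    cases hm : (PySem.List.pyGet? l i).bind (fun r => PySem.List.pyGet? r j) with
    | none => rfl
    | some c =>
      have hi : PySem.Raise.InRange l.length i := by
        by_contra hc
        rw [(PySem.List.pyGet?_eq_none_iff _ _).mpr hc] at hm
        simp at hm
      have hlow := hi.1
      by_cases hX : c = "X"
      · simp [hX, hm]
      · by_cases hH : c = "#"
        · simp [hH, hm]
        · by_cases hL : c = "L"
          · simp [hL, hm]
          · simp only [hX, hH, hL, and_true, or_self, Bool.or_eq_true, decide_eq_true_eq,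
              if_neg, not_false_eq_true]
            exact ih (i - 1) (j - 1) (by omega)

-- ===== VERDICT (by name: the statement is the Claim_ definition above) =====
theorem check_tl_spec : Claim_equal_check_tl := by
  intro l i j start _ hpre
  unfold Spec_check_tl check_tl_alt
  cases start with
  | false => simpa using check_tl_false_eq l i j
  | true =>
    obtain ⟨k, _, hk1, hsome, _, _⟩ := hpre
    have h0 := hsome 0 (Nat.zero_le k)
    have h0' : ((PySem.List.pyGet? l i).bind (fun r => PySem.List.pyGet? r j)).isSome := by
      simpa [pvDiag] using h0
    rw [check_tl.eq_def]
    cases hm : (PySem.List.pyGet? l i).bind (fun r => PySem.List.pyGet? r j) with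
    | none => rw [hm] at h0'; simp at h0'
    | some c =>
      simp only [and_false, Bool.true_eq_false, if_true]
      simpa using check_tl_false_eq l (i - 1) (j - 1)
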